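-- pv_equiv track=rewrite | github.com/tolkit/telomeric-identifier | clades/build_clades.py | filter_telo_repeats
-- ===== SOURCE A (Python) =====
-- def principal_period(s):
--     i = (s + s).find(s, 1, -1)
--     return None if i == -1 else s[:i]
--
-- def filter_telo_repeats(l):
--     r_simple_repeats = []
--     # for string in the list
--     for s in l:
--         if isinstance(s, str):
--             if principal_period(s) is None:
--                 if s != len(s) * s[0]:
--                     r_simple_repeats.append(s)
--
--     return r_simple_repeats
-- ===== SOURCE B (Python) =====
-- def filter_telo_repeats(l):
--     out = []
--     for s in l:
--         if isinstance(s, str):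
--             n = len(s)
--             if not any(n % d == 0 and s == s[:d] * (n // d) for d in range(1, n)):
--                 if s != n * s[0]:
--                     out.append(s)
--     return out
-- ===== Notes on version B (the rewrite author's own statement) =====
-- stated objective: alternative
-- what changed: Replaces A's string-doubling primitivity test (s+s).find(s,1,-1) with a proper-divisor enumeration: s is periodic iff some proper divisor d of n=len(s) has s == s[:d]*(n//d); the mono-char check stays as in A.
import Mathlib
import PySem

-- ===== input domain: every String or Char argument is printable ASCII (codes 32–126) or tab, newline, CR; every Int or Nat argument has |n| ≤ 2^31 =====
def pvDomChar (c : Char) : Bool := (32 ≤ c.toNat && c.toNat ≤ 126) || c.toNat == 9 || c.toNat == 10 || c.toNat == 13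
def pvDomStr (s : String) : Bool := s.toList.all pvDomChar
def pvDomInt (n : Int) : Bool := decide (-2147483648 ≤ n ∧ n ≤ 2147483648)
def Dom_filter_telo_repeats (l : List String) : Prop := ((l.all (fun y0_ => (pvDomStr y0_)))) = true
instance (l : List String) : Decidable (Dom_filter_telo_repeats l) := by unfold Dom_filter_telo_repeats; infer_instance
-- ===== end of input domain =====

-- B replaces A's (s+s).find(s,1,-1) string-doubling primitivity test by a proper-divisor
-- enumeration test (keeping the mono-char check); alternative decomposition, not claimed faster.

-- ===== PORT A =====
-- i = (s + s).find(s, 1, -1); return None if i == -1 else s[:i]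
def principal_period (s : String) : Option String :=
  let cs := s.toList
  let i := PySem.Chars.findFrom (cs ++ cs) cs 1 (some (-1))
  if i = -1 then none else some (String.ofList (PySem.List.slice cs none (some i)))

-- body of A's loop: append s iff principal_period(s) is None and s != len(s) * s[0]
def keepA (s : String) : Bool :=
  let cs := s.toList
  if (principal_period s).isNone then
    match PySem.List.pyGet? cs 0 with
    | some c => decide (cs ≠ PySem.List.pyRepeat [c] (cs.length : Int))
    | none => false   -- Python raises IndexError here (s = ""); excluded by Pre_
  else false

def filter_telo_repeats (l : List String) : List String :=
  l.foldl (fun r s => if keepA s then r ++ [s] else r) []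

-- ===== PORT B =====
-- any(n % d == 0 and s == s[:d] * (n // d) for d in range(1, n))
def hasDivisorPeriod (cs : List Char) : Bool :=
  let n := cs.length
  (List.range' 1 (n - 1)).any fun d =>
    n % d == 0 && cs == PySem.List.pyRepeat (cs.take d) ((n / d : Nat) : Int)

def keepB (s : String) : Bool :=
  let cs := s.toList
  if !hasDivisorPeriod cs then
    match PySem.List.pyGet? cs 0 with
    | some c => decide (cs ≠ PySem.List.pyRepeat [c] (cs.length : Int))
    | none => false   -- Python raises IndexError here (s = ""); excluded by Pre_
  else false

def filter_telo_repeats_alt (l : List String) : List String :=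
  l.foldl (fun out s => if keepB s then out ++ [s] else out) []

-- ===== PRECONDITION & SPEC =====
-- Pre_ excludes lists containing the empty string, on which A (and B alike) raises
-- IndexError at s[0].
def Pre_filter_telo_repeats (l : List String) : Prop := ∀ s ∈ l, s ≠ ""
instance (l : List String) : Decidable (Pre_filter_telo_repeats l) := by
  unfold Pre_filter_telo_repeats; infer_instance

def pvWitness_filter_telo_repeats : List String := ["TTAGGG", "AACCCT", "ATAT", "GG", "A"]

def Spec_filter_telo_repeats (l : List String) (out : List String) : Prop :=
  out = filter_telo_repeats_alt l
instance (l : List String) (out : List String) : Decidable (Spec_filter_telo_repeats l out) := by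
  unfold Spec_filter_telo_repeats; infer_instance

-- ===== CLAIM (what is proved, stated in full; the proofs are below) =====
def Claim_equal_filter_telo_repeats : Prop := ∀ (l : List String),
  Dom_filter_telo_repeats l → Pre_filter_telo_repeats l →
  Spec_filter_telo_repeats l (filter_telo_repeats l)

-- ===== LEMMAS AND PROOFS =====

-- rotating by a multiple of a fixed point of rotation is the identity
lemma rotate_mul_self {cs : List Char} {i : Nat} (h : cs.rotate i = cs) :
    ∀ k, cs.rotate (i * k) = cs := by
  intro k; induction k with
  | zero => simp
  | succ k ih =>
    have : cs.rotate (i * k + i) = cs := by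
      rw [← List.rotate_rotate, ih, h]
    simpa [Nat.mul_succ] using this

lemma rotate_mod_self {cs : List Char} {i m' : Nat} (hi : cs.rotate i = cs)
    (hm : cs.rotate m' = cs) : cs.rotate (m' % i) = cs := by
  have h1 : cs.rotate (i * (m' / i)) = cs := rotate_mul_self hi _
  have h2 : i * (m' / i) + m' % i = m' := Nat.div_add_mod m' i
  calc cs.rotate (m' % i) = (cs.rotate (i * (m' / i))).rotate (m' % i) := by rw [h1]
    _ = cs.rotate (i * (m' / i) + m' % i) := List.rotate_rotate cs _ _
    _ = cs := by rw [h2]; exact hm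

lemma rotate_gcd_self {cs : List Char} :
    ∀ i, cs.rotate i = cs → ∀ m', cs.rotate m' = cs → cs.rotate (Nat.gcd i m') = cs := by
  intro i
  induction i using Nat.strong_induction_on with
  | _ i ih =>
    intro hi m' hm
    cases i with
    | zero => simpa using hm
    | succ j =>
      rw [Nat.gcd_rec]
      exact ih (m' % (j + 1)) (Nat.mod_lt _ (Nat.succ_pos j))
        (rotate_mod_self hi hm) (j + 1) hi

-- a fixed point of rotation by a divisor of the length is a repetition of its prefix
lemma periodic_of_rotate {d : Nat} (_hd : 0 < d) :
    ∀ q (cs : List Char), cs.length = q * d → cs.rotate d = cs →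
      cs = (List.replicate q (cs.take d)).flatten := by
  intro q
  induction q with
  | zero =>
    intro cs hl _
    simp only [Nat.zero_mul] at hl
    simp [List.length_eq_zero_iff.mp hl]
  | succ q ih =>
    intro cs hl hr
    have hdl : d ≤ cs.length := by rw [hl]; nlinarith
    have hrot : cs.drop d ++ cs.take d = cs := by
      rw [← List.rotate_eq_drop_append_take hdl]; exact hr
    by_cases hq : q = 0
    · subst hq
      have : cs.take d = cs := List.take_of_length_le (by omega)
      simp [this]
    · have hq1 : 1 ≤ q := Nat.pos_of_ne_zero hq
      have hdq : d ≤ q * d := Nat.le_mul_of_pos_left d hq1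
      have hle : cs.length = q * d + d := by rw [hl]; ring
      have hqd : d ≤ (cs.drop d).length := by simp; omega
      have htake : cs.take d = (cs.drop d).take d := by
        conv_lhs => rw [← hrot]
        rw [List.take_append_of_le_length hqd]
      have hdrop : (cs.drop d).drop d ++ (cs.drop d).take d = cs.drop d := by
        conv_rhs => rw [← hrot]
        rw [List.drop_append_of_le_length hqd, htake]
      have hlen : (cs.drop d).length = q * d := by simp; omega
      have hrd : (cs.drop d).rotate d = cs.drop d := by
        rw [List.rotate_eq_drop_append_take (by omega)]; exact hdrop
      have := ih (cs.drop d) hlen hrd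
      calc cs = cs.take d ++ cs.drop d := (List.take_append_drop d cs).symm
        _ = cs.take d ++ (List.replicate q ((cs.drop d).take d)).flatten := by rw [← this]
        _ = (List.replicate (q + 1) (cs.take d)).flatten := by
              rw [← htake]; simp [List.replicate_succ]

lemma flatten_replicate_rotate {u : List Char} {d : Nat} (q' : Nat) (hu : u.length = d)
    (_hd : 0 < d) :
    ((List.replicate (q' + 1) u).flatten).rotate d = (List.replicate (q' + 1) u).flatten := by
  have hlen : d ≤ ((List.replicate (q' + 1) u).flatten).length := by
    simp [hu]; nlinarith
  rw [List.rotate_eq_drop_append_take hlen, List.replicate_succ, List.flatten_cons,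
      List.drop_append_of_le_length (by omega), List.take_append_of_le_length (by omega)]
  have h1 : List.drop d u = [] := by rw [← hu]; exact List.drop_length
  have h2 : List.take d u = u := List.take_of_length_le (le_of_eq hu)
  rw [h1, h2, List.nil_append]
  calc (List.replicate q' u).flatten ++ u
      = (List.replicate q' u ++ [u]).flatten := by simp [List.flatten_append]
    _ = (List.replicate (q' + 1) u).flatten := by rw [← List.replicate_succ']

lemma rotate_of_periodic {d : Nat} {cs : List Char} (hd : 0 < d)
    (hdvd : d ∣ cs.length) (hlt : d < cs.length)
    (hp : cs = (List.replicate (cs.length / d) (cs.take d)).flatten) :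
    cs.rotate d = cs := by
  obtain ⟨q, hq⟩ := hdvd
  have hqd : cs.length / d = q := by rw [hq, Nat.mul_div_cancel_left _ hd]
  have hu : (cs.take d).length = d := by simp [List.length_take]; omega
  have hqpos : 0 < q := by
    rcases Nat.eq_zero_or_pos q with h0 | h0
    · subst h0; omega
    · exact h0
  obtain ⟨q', hq'⟩ : ∃ q', q = q' + 1 := ⟨q - 1, by omega⟩
  rw [hqd, hq'] at hp
  conv_lhs => rw [hp]
  conv_rhs => rw [hp]
  exact flatten_replicate_rotate q' (hp ▸ hu) hd

-- rotation fixed point in (0, m) ↔ proper-divisor repetition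
lemma rotate_iff_divisor {cs : List Char} :
    (∃ i, 1 ≤ i ∧ i < cs.length ∧ cs.rotate i = cs) ↔
    (∃ d, 1 ≤ d ∧ d < cs.length ∧ d ∣ cs.length ∧
      cs = (List.replicate (cs.length / d) (cs.take d)).flatten) := by
  constructor
  · rintro ⟨i, h1, h2, h3⟩
    have hg1 : 0 < Nat.gcd i cs.length := Nat.gcd_pos_of_pos_left _ (by omega)
    have hg2 : Nat.gcd i cs.length ≤ i := Nat.gcd_le_left _ (by omega)
    refine ⟨Nat.gcd i cs.length, by omega, by omega, Nat.gcd_dvd_right _ _, ?_⟩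
    · have hrot : cs.rotate (Nat.gcd i cs.length) = cs :=
        rotate_gcd_self i h3 cs.length (List.rotate_length cs)
      have hgpos : 0 < Nat.gcd i cs.length := Nat.gcd_pos_of_pos_left _ (by omega)
      exact periodic_of_rotate hgpos (cs.length / Nat.gcd i cs.length) cs
        (by rw [Nat.div_mul_cancel (Nat.gcd_dvd_right _ _)]) hrot
  · rintro ⟨d, h1, h2, h3, h4⟩
    exact ⟨d, h1, h2, rotate_of_periodic (by omega) h3 h2 h4⟩

-- the search window of (s+s).find(s,1,-1)
lemma window_eq {cs : List Char} (h : cs ≠ []) :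
    (((cs ++ cs).take (2 * cs.length - 1)).drop 1) = cs.tail ++ cs.dropLast := by
  have hm : 1 ≤ cs.length := List.length_pos_iff.mpr h
  have h1 : (cs ++ cs).take (2 * cs.length - 1) = cs ++ cs.take (cs.length - 1) := by
    have h2 : 2 * cs.length - 1 = cs.length + (cs.length - 1) := by omega
    rw [h2, List.take_append, List.take_of_length_le (by omega)]
    congr 1
    congr 1
    omega
  rw [h1, List.drop_append_of_le_length (by omega), List.drop_one, ← List.dropLast_eq_take]

lemma findFrom_eq_neg_one_iff {cs : List Char} (h : cs ≠ []) :
    PySem.Chars.findFrom (cs ++ cs) cs 1 (some (-1)) = -1 ↔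
    ¬ cs <:+: (cs.tail ++ cs.dropLast) := by
  have hm : 1 ≤ cs.length := List.length_pos_iff.mpr h
  rw [← window_eq h, ← PySem.Chars.find_eq_neg_one_iff]
  unfold PySem.Chars.findFrom
  simp only [List.length_append]
  have hx : (-1 + ((cs.length : Int) + cs.length)).toNat = 2 * cs.length - 1 := by omega
  rw [List.drop_one]
  split_ifs <;> first
    | (exfalso; omega)
    | (rename_i h6
       push_cast at h6 ⊢
       simp only [hx, List.drop_one] at h6 ⊢
       have hge := PySem.Chars.neg_one_le_find ((List.take (2 * cs.length - 1) (cs ++ cs)).tail) cs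
       simp [h6]
       try omega)

lemma infix_iff_exists_drop {sub s : List Char} : sub <:+: s ↔ ∃ j, sub <+: s.drop j := by
  rw [← PySem.Chars.isIn_iff_infix, ← PySem.Chars.exists_prefix_drop_iff_isIn]

-- infix in tail++dropLast ↔ nontrivial rotation fixed point
lemma infix_iff_rotate {cs : List Char} (h : cs ≠ []) :
    cs <:+: (cs.tail ++ cs.dropLast) ↔ ∃ i, 1 ≤ i ∧ i < cs.length ∧ cs.rotate i = cs := by
  have hm : 1 ≤ cs.length := List.length_pos_iff.mpr h
  have hdrop : ∀ j, j ≤ cs.length - 2 →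
      (cs.tail ++ cs.dropLast).drop j = cs.drop (j + 1) ++ cs.dropLast := by
    intro j hj
    rw [List.drop_append_of_le_length (by simp [List.length_tail]; omega),
        ← List.drop_one, List.drop_drop, Nat.add_comm 1 j]
  rw [infix_iff_exists_drop]
  constructor
  · rintro ⟨j, hj⟩
    have hlen := hj.length_le
    have hwlen : ((cs.tail ++ cs.dropLast).drop j).length =
        (cs.length - 1) + (cs.length - 1) - j := by simp
    rw [hwlen] at hlen
    have hj2 : j ≤ cs.length - 2 := by omega
    have hm2 : 2 ≤ cs.length := by omega
    rw [hdrop j hj2] at hj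
    have heq := List.prefix_iff_eq_take.mp hj
    refine ⟨j + 1, by omega, by omega, ?_⟩
    rw [List.rotate_eq_drop_append_take (by omega)]
    rw [List.take_append, List.take_of_length_le (by simp),
        List.dropLast_eq_take, List.take_take] at heq
    simp only [List.length_drop] at heq
    rw [show cs.length - (cs.length - (j + 1)) = j + 1 by omega,
        show min (j + 1) (cs.length - 1) = j + 1 by omega] at heq
    exact heq.symm
  · rintro ⟨i, h1, h2, h3⟩
    refine ⟨i - 1, ?_⟩
    rw [hdrop (i - 1) (by omega), Nat.sub_add_cancel h1]
    have hpre : cs.take i <+: cs.dropLast := by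
      rw [List.dropLast_eq_take,
          show List.take i cs = List.take i (List.take (cs.length - 1) cs) by
            rw [List.take_take]; congr 1; omega]
      exact List.take_prefix _ _
    obtain ⟨t, ht⟩ := hpre
    refine ⟨t, ?_⟩
    conv_lhs => rw [← h3, List.rotate_eq_drop_append_take (by omega)]
    rw [List.append_assoc, ht]

lemma hasDivisorPeriod_iff (cs : List Char) : hasDivisorPeriod cs = true ↔
    ∃ d, 1 ≤ d ∧ d < cs.length ∧ d ∣ cs.length ∧
      cs = (List.replicate (cs.length / d) (cs.take d)).flatten := by
  unfold hasDivisorPeriod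
  simp only [List.any_eq_true, List.mem_range'_1, Bool.and_eq_true, beq_iff_eq,
    PySem.List.pyRepeat, Int.toNat_natCast]
  constructor
  · rintro ⟨d, ⟨hd1, hd2⟩, hmod, heq⟩
    exact ⟨d, hd1, by omega, Nat.dvd_iff_mod_eq_zero.mpr hmod, heq⟩
  · rintro ⟨d, hd1, hd2, hdvd, heq⟩
    exact ⟨d, ⟨hd1, by omega⟩, Nat.dvd_iff_mod_eq_zero.mp hdvd, heq⟩

lemma keepA_eq_keepB (s : String) (h : s.toList ≠ []) : keepA s = keepB s := by
  have hpp : (principal_period s).isNone = true ↔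
      ¬ ∃ d, 1 ≤ d ∧ d < s.toList.length ∧ d ∣ s.toList.length ∧
        s.toList = (List.replicate (s.toList.length / d) (s.toList.take d)).flatten := by
    rcases eq_or_ne (PySem.Chars.findFrom (s.toList ++ s.toList) s.toList 1 (some (-1))) (-1)
      with he | he
    · have h1 : (principal_period s).isNone = true := by
        unfold principal_period; simp [he]
      have hno := (infix_iff_rotate h).not.mp ((findFrom_eq_neg_one_iff h).mp he)
      rw [rotate_iff_divisor] at hno
      exact iff_of_true h1 hno
    · have h1 : (principal_period s).isNone = false := by
        unfold principal_period; simp [he]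
      have hex : ∃ i, 1 ≤ i ∧ i < s.toList.length ∧ s.toList.rotate i = s.toList := by
        by_contra hno
        exact he ((findFrom_eq_neg_one_iff h).mpr ((infix_iff_rotate h).not.mpr hno))
      rw [rotate_iff_divisor] at hex
      exact iff_of_false (by simp [h1]) (fun hno => hno hex)
  unfold keepA keepB
  rcases Bool.eq_false_or_eq_true (hasDivisorPeriod s.toList) with hb | hb
  · have hn : (principal_period s).isNone = false := by
      rcases Bool.eq_false_or_eq_true (principal_period s).isNone with hn | hn
      · exact absurd ((hasDivisorPeriod_iff _).mp hb) (hpp.mp hn)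
      · exact hn
    simp only [hn, hb, Bool.not_true, Bool.false_eq_true, if_false]
  · have hn : (principal_period s).isNone = true := by
      rw [hpp, ← hasDivisorPeriod_iff]
      simp [hb]
    simp only [hn, hb, Bool.not_false, if_true]

-- ===== VERDICT (by name: the statement is the Claim_ definition above) =====
theorem filter_telo_repeats_spec : Claim_equal_filter_telo_repeats := by
  intro l _ hpre
  unfold Spec_filter_telo_repeats filter_telo_repeats filter_telo_repeats_alt
  have hA := PySem.List.foldl_append_if keepA (id : String → String) l []
  have hB := PySem.List.foldl_append_if keepB (id : String → String) l []
  simp only [id] at hA hB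
  rw [hA, hB, List.filter_congr (fun s hs => keepA_eq_keepB s
    (fun hn => hpre s hs (String.toList_inj.mp (by simp [hn]))))]
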